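-- pv_equiv track=rewrite | github.com/sourabh957/jenkins_practise | add.py | function
-- ===== SOURCE A (Python) =====
-- import itertools
--
-- def function(s, temp_test_case) :
--     test_case = []
--
--     for str in temp_test_case :
--         str = str.lower()
--         test_case.append(str)
--
--     for item in test_case :
--         if item == s :
--             return True
--
--     s = s.lower()
--     l = tuple(s.split(' '))
--     permutations = list(itertools.permutations(l))
--
--     temp_test_case = []
--     for item in test_case :
--         temp_string = item.split(' ')
--         temp_test_case.append(tuple(temp_string))
--
--     for item1 in temp_test_case :
--         for item2 in permutations :
--             if item1 == item2 :
--                 return True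
--
--
--     return False
-- ===== SOURCE B (Python) =====
-- def function(s, temp_test_case):
--     for item in temp_test_case:
--         if item.lower() == s:
--             return True
--     key = sorted(s.lower().split(' '))
--     for item in temp_test_case:
--         if sorted(item.lower().split(' ')) == key:
--             return True
--     return False
-- ===== Notes on version B (the rewrite author's own statement) =====
-- stated objective: alternative
-- what changed: B replaces enumerating all k! word permutations of s and scanning them per test case by comparing sorted word lists (multiset equality), and drops the intermediate lowered-copy lists.
import Mathlib
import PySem

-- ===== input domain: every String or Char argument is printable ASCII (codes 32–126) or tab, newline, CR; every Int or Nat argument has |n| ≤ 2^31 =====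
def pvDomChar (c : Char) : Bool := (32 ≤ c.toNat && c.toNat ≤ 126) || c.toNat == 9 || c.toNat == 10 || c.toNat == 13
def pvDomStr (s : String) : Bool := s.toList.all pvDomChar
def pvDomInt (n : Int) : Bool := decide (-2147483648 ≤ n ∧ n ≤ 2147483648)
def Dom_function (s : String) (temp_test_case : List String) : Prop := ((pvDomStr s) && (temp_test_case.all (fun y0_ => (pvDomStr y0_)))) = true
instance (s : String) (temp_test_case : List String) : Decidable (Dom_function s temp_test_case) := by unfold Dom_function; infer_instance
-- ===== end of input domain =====

-- B checks word-multiset equality via sorted word lists instead of enumerating all permutations (objective: alternative).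

-- ===== PORT A =====
def function (s : String) (temp_test_case : List String) : Bool :=
  -- test_case = [str.lower() for str in temp_test_case]  (explicit append loop in A)
  let test_case := temp_test_case.foldl (fun acc str => acc ++ [PySem.Str.lower str]) []
  if test_case.any (fun item => item == s) then true
  else
    let s' := PySem.Str.lower s
    -- s.split(' '): sep " " is nonempty so split? is always `some`; getD only discharges the Option
    let l := (PySem.Str.split? s' " ").getD []
    let permutations := PySem.List.permutations l l.length
    let ttc := test_case.foldl (fun acc item => acc ++ [(PySem.Str.split? item " ").getD []]) []
    ttc.any (fun item1 => permutations.any (fun item2 => item1 == item2))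

-- ===== PORT B =====
def function_alt (s : String) (temp_test_case : List String) : Bool :=
  if temp_test_case.any (fun item => PySem.Str.lower item == s) then true
  else
    let key := PySem.List.sorted ((PySem.Str.split? (PySem.Str.lower s) " ").getD []) (fun x => x)
    temp_test_case.any (fun item =>
      PySem.List.sorted ((PySem.Str.split? (PySem.Str.lower item) " ").getD []) (fun x => x) == key)

-- ===== PRECONDITION & SPEC =====
def Spec_function (s : String) (temp_test_case : List String) (out : Bool) : Prop := out = function_alt s temp_test_case
instance (s : String) (temp_test_case : List String) (out : Bool) : Decidable (Spec_function s temp_test_case out) := by unfold Spec_function; infer_instance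

-- ===== CLAIM (what is proved, stated in full; the proofs are below) =====
def Claim_equal_function : Prop := ∀ (s : String) (temp_test_case : List String), Dom_function s temp_test_case → Spec_function s temp_test_case (function s temp_test_case)

-- ===== LEMMAS AND PROOFS =====

-- the append-accumulator loop is map
lemma foldl_append_map {α β : Type} (f : α → β) : ∀ (xs : List α) (acc : List β),
    xs.foldl (fun acc x => acc ++ [f x]) acc = acc ++ xs.map f := by
  intro xs
  induction xs with
  | nil => simp
  | cons a t ih => intro acc; simp [List.foldl, ih]

-- converse of perm_of_mem_permutations: every permutation of xs is enumerated
lemma mem_permutations_of_perm {α : Type} [DecidableEq α] :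
    ∀ (p xs : List α), p.Perm xs → p ∈ PySem.List.permutations xs p.length := by
  intro p
  induction p with
  | nil =>
    intro xs h
    have : xs = [] := h.symm.eq_nil
    subst this
    simp [PySem.List.permutations_zero]
  | cons a t ih =>
    intro xs h
    have hmem : a ∈ xs := h.mem_iff.mp (by simp)
    have ht : t.Perm (xs.erase a) := (List.cons_perm_iff_perm_erase.mp h).2
    have hi : xs.idxOf a < xs.length := List.idxOf_lt_length_of_mem hmem
    have hget : xs[xs.idxOf a]? = some a := by
      rw [List.getElem?_eq_getElem hi]
      exact congrArg some (List.getElem_idxOf hi)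
    have herase : xs.eraseIdx (xs.idxOf a) = xs.erase a :=
      (List.erase_eq_eraseIdx_of_idxOf rfl).symm
    have hrec : t ∈ PySem.List.permutations (xs.eraseIdx (xs.idxOf a)) t.length := by
      rw [herase]; exact ih _ ht
    rw [List.length_cons, PySem.List.permutations_succ]
    refine List.mem_flatMap.mpr ⟨xs.idxOf a, List.mem_range.mpr hi, ?_⟩
    rw [hget]
    exact List.mem_map.mpr ⟨t, hrec, rfl⟩

-- scanning the permutation list = comparing sorted word lists
lemma any_permutations_eq_sorted (x l : List String) :
    (PySem.List.permutations l l.length).any (fun p => x == p) =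
      (PySem.List.sorted x (fun y => y) == PySem.List.sorted l (fun y => y)) := by
  rw [Bool.eq_iff_iff]
  simp only [List.any_eq_true, beq_iff_eq]
  constructor
  · rintro ⟨p, hp, rfl⟩
    exact (PySem.List.sorted_id_eq_sorted_id_iff_perm x l).mpr
      (PySem.List.perm_of_mem_permutations hp)
  · intro hs
    have hperm : x.Perm l := (PySem.List.sorted_id_eq_sorted_id_iff_perm x l).mp hs
    refine ⟨x, ?_, rfl⟩
    have := mem_permutations_of_perm x l hperm
    rwa [hperm.length_eq] at this
-- ===== VERDICT (by name: the statement is the Claim_ definition above) =====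
theorem function_spec : Claim_equal_function := by
  intro s temp_test_case _
  unfold Spec_function function function_alt
  simp only [foldl_append_map, List.nil_append, List.map_map, List.any_map]
  rw [show ((fun item => item == s) ∘ PySem.Str.lower) = (fun item => PySem.Str.lower item == s) from rfl]
  split
  · rfl
  · refine congrArg temp_test_case.any (funext fun item => ?_)
    rw [Function.comp_apply, Function.comp_apply]
    exact any_permutations_eq_sorted _ _
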